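-- pv_equiv track=rewrite | github.com/yanngasner/algorithmsChallenge | LeetCodeChallenges/maximumProductSubarray.py | getWithoutZeroListsAndHasZero
-- ===== SOURCE A (Python) =====
-- from typing import List
--
-- def getWithoutZeroListsAndHasZero(nums: List[int]) -> List[List[int]]:
--     result = []
--     hasZero = False
--     currentList = []
--     for i in nums:
--         if i == 0:
--             hasZero = True
--             if currentList:
--                 result.append(currentList)
--                 currentList = []
--         else:
--             currentList.append(i)
--     if currentList:
--         result.append(currentList)
--     return result, hasZero
-- ===== SOURCE B (Python) =====
-- from itertools import groupby
-- from typing import List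
--
-- def getWithoutZeroListsAndHasZero(nums: List[int]):
--     result = [list(g) for k, g in groupby(nums, key=lambda x: x == 0) if not k]
--     return result, 0 in nums
-- ===== Notes on version B (the rewrite author's own statement) =====
-- stated objective: idiomatic
-- what changed: Replaces the fused single loop with explicit accumulator/flush logic by two separate standard-library passes: itertools.groupby splits the list into maximal runs (keeping non-zero runs) and '0 in nums' computes the flag independently.
import Mathlib
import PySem

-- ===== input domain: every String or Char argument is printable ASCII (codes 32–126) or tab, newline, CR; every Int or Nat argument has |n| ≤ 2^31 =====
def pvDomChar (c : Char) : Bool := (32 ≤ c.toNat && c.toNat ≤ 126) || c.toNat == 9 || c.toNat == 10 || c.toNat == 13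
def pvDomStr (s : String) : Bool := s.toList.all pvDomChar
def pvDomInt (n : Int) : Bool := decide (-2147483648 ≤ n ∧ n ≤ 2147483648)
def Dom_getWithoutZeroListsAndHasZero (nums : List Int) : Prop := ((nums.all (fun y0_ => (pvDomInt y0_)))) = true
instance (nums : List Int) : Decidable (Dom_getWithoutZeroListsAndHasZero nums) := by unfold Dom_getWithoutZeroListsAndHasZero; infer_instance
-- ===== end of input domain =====

-- B replaces A's fused loop (accumulator + flush on zero) by two independent standard passes:
-- groupby-style run-splitting keeping the non-zero runs, and a separate membership test for the flag.

-- ===== PORT A =====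
-- literal port of A's loop body: state is (result, hasZero, currentList)
def pvStepA (s : List (List Int) × Bool × List Int) (i : Int) : List (List Int) × Bool × List Int :=
  if i = 0 then
    if s.2.2 ≠ [] then (s.1 ++ [s.2.2], true, [])
    else (s.1, true, s.2.2)
  else (s.1, s.2.1, s.2.2 ++ [i])

def getWithoutZeroListsAndHasZero (nums : List Int) : List (List Int) × Bool :=
  let st := nums.foldl pvStepA ([], false, [])
  -- final flush of currentList, then return (result, hasZero)
  (if st.2.2 ≠ [] then st.1 ++ [st.2.2] else st.1, st.2.1)

-- ===== PORT B =====
-- port of Source B's groupby comprehension: split into maximal runs, keep the non-zero runs.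
-- pvSplit returns (the leading non-zero run, the remaining kept groups).
def pvSplit : List Int → List Int × List (List Int)
  | [] => ([], [])
  | x :: xs =>
    let (run, gs) := pvSplit xs
    if x = 0 then ([], if run = [] then gs else run :: gs)
    else (x :: run, gs)

def pvAltGroups (nums : List Int) : List (List Int) :=
  if (pvSplit nums).1 = [] then (pvSplit nums).2
  else (pvSplit nums).1 :: (pvSplit nums).2

def getWithoutZeroListsAndHasZero_alt (nums : List Int) : List (List Int) × Bool :=
  (pvAltGroups nums, nums.contains 0)

-- ===== PRECONDITION & SPEC =====
def Spec_getWithoutZeroListsAndHasZero (nums : List Int) (out : List (List Int) × Bool) : Prop := out = getWithoutZeroListsAndHasZero_alt nums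
instance (nums : List Int) (out : List (List Int) × Bool) : Decidable (Spec_getWithoutZeroListsAndHasZero nums out) := by unfold Spec_getWithoutZeroListsAndHasZero; infer_instance

-- ===== CLAIM (what is proved, stated in full; the proofs are below) =====
def Claim_equal_getWithoutZeroListsAndHasZero : Prop := ∀ (nums : List Int), Dom_getWithoutZeroListsAndHasZero nums → Spec_getWithoutZeroListsAndHasZero nums (getWithoutZeroListsAndHasZero nums)

-- ===== LEMMAS AND PROOFS =====

-- proof-side characterisation of A's loop: grouping with a pending prefix cur
def pvGW (cur : List Int) : List Int → List (List Int)
  | [] => if cur = [] then [] else [cur]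
  | x :: xs =>
    if x = 0 then (if cur = [] then pvGW [] xs else cur :: pvGW [] xs)
    else pvGW (cur ++ [x]) xs

-- A's final flush, as a function of the loop state
def pvFinishA (st : List (List Int) × Bool × List Int) : List (List Int) × Bool :=
  (if st.2.2 ≠ [] then st.1 ++ [st.2.2] else st.1, st.2.1)

theorem pvGW_eq (nums : List Int) : ∀ (cur : List Int),
    pvGW cur nums =
      (if cur ++ (pvSplit nums).1 = [] then (pvSplit nums).2
       else (cur ++ (pvSplit nums).1) :: (pvSplit nums).2) := by
  induction nums with
  | nil => intro cur; by_cases h : cur = [] <;> simp [pvGW, pvSplit, h]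
  | cons x xs ih =>
    intro cur
    by_cases hx : x = 0
    · subst hx
      by_cases h : cur = [] <;>
        by_cases hr : (pvSplit xs).1 = [] <;>
          simp [pvGW, pvSplit, h, hr, ih]
    · simp [pvGW, pvSplit, hx, ih]

theorem pvLoopA_eq (nums : List Int) :
    ∀ (res : List (List Int)) (hz : Bool) (cur : List Int),
    pvFinishA (List.foldl pvStepA (res, hz, cur) nums)
      = (res ++ pvGW cur nums, hz || nums.contains 0) := by
  induction nums with
  | nil =>
    intro res hz cur
    by_cases h : cur = [] <;> simp [pvFinishA, pvGW, h]
  | cons x xs ih =>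
    intro res hz cur
    rw [List.foldl_cons]
    by_cases hx : x = 0
    · subst hx
      by_cases h : cur = [] <;>
        simp [pvStepA, h, ih, pvGW, List.append_assoc]
    · have hx2 : (0:Int) ≠ x := fun h => hx h.symm
      simp [pvStepA, hx, ih, pvGW, hx2]

-- ===== VERDICT (by name: the statement is the Claim_ definition above) =====
theorem getWithoutZeroListsAndHasZero_spec : Claim_equal_getWithoutZeroListsAndHasZero := by
  intro nums _
  show getWithoutZeroListsAndHasZero nums = getWithoutZeroListsAndHasZero_alt nums
  have h := pvLoopA_eq nums [] false []
  simp only [pvFinishA] at h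
  simp only [getWithoutZeroListsAndHasZero]
  rw [h]
  simp [pvGW_eq, getWithoutZeroListsAndHasZero_alt, pvAltGroups]
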